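-- pv_equiv track=rewrite | github.com/majstenmark/kattis | bits.py | solve
-- ===== SOURCE A (Python) =====
-- def solve(x):
--     L = len(x)
--     v = 0
--     mx = 0
--     for ch in x:
--         digit = int(ch)
--         v *= 10
--         v += digit
--         binary = bin(v)
--         ones =binary.count('1')
--         mx = max(mx, ones)
--     return mx
-- ===== SOURCE B (Python) =====
-- def solve(x):
--     best = 0
--     for i in range(1, len(x) + 1):
--         n = 0
--         for c in x[:i]:
--             n = 10 * n + int(c)
--         ones = 0
--         while n:
--             ones += n & 1
--             n >>= 1
--         best = max(best, ones)
--     return best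
-- ===== Notes on version B (the rewrite author's own statement) =====
-- stated objective: alternative
-- what changed: Replaces A's single stateful pass (accumulator v carried across the loop, popcount obtained by counting one-characters of the bin() string) with independent per-prefix recomputation: for each prefix length i the value is re-folded from the prefix's characters and its popcount is computed by bit arithmetic (AND with one, right shift), with no bin() string and no accumulator carried between prefixes.
import Mathlib
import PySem

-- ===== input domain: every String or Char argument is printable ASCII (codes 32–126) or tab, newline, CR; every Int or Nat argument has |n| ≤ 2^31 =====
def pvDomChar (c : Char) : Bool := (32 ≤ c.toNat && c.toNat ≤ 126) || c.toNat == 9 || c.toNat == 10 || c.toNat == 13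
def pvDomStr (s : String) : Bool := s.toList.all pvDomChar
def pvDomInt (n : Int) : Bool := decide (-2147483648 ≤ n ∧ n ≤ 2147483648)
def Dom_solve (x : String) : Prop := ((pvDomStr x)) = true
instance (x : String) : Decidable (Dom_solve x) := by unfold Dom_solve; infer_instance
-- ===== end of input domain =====

-- B replaces A's single stateful pass (carried accumulator + bin-string counting) with independent
-- per-prefix recomputation and bit-arithmetic popcount: an alternative decomposition, not faster.

-- ===== PORT A =====
def solve (x : String) : Int :=
  let _L := PySem.Str.len x                     -- L = len(x)  (unused, as in A)
  let st := x.toList.foldl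
    (fun (p : Int × Int) ch =>
      -- digit = int(ch); Pre_solve guarantees ch is a digit so ofStr? is some (the getD 0 is unreachable)
      let digit := (PySem.Int.ofStr? (String.ofList [ch])).getD 0
      let v := p.1 * 10 + digit
      let binary := PySem.Int.pyBin v           -- binary = bin(v)
      let ones : Int := (PySem.Str.count binary "1" : Nat)   -- ones = binary.count('1')
      (v, max p.2 ones))
    (0, 0)
  st.2

-- ===== PORT B =====
-- 'while n: ones += n & 1; n >>= 1'. In Source B n is always ≥ 0 on inputs in Pre_ (it is a fold of
-- digit values), and for n ≥ 0 Python's n & 1 is n % 2 and n >>= 1 is n / 2 on n.toNat: exact there.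
def pvPopLoop (n c : Nat) : Nat :=
  if n = 0 then c else pvPopLoop (n / 2) (c + n % 2)

-- 'n = 0; for c in p: n = 10 * n + int(c)'; Pre_solve guarantees each c is a digit (getD 0 unreachable)
def pvPrefixVal (cs : List Char) : Int :=
  cs.foldl (fun a c => 10 * a + (PySem.Int.ofStr? (String.ofList [c])).getD 0) 0

def solve_alt (x : String) : Int :=
  (PySem.List.pyRange 1 (PySem.Str.len x + 1) 1).foldl
    (fun best i =>
      let n := pvPrefixVal (PySem.List.slice x.toList none (some i))   -- x[:i]
      let ones : Int := (pvPopLoop n.toNat 0 : Nat)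
      max best ones)
    0

-- ===== PRECONDITION & SPEC =====
-- A raises ValueError on int(ch) for any non-digit character; Pre_ admits exactly the digit strings
-- (including ""), on all of which A returns normally.
def Pre_solve (x : String) : Prop := x.toList.all PySem.Chars.isdigit = true
instance (x : String) : Decidable (Pre_solve x) := by unfold Pre_solve; infer_instance
def pvWitness_solve : String := "9071"

def Spec_solve (x : String) (out : Int) : Prop := out = solve_alt x
instance (x : String) (out : Int) : Decidable (Spec_solve x out) := by unfold Spec_solve; infer_instance

-- ===== CLAIM (what is proved, stated in full; the proofs are below) =====
def Claim_equal_solve : Prop := ∀ (x : String), Dom_solve x → Pre_solve x → Spec_solve x (solve x)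

-- ===== LEMMAS AND PROOFS =====

-- int(ch) of a single digit character is its value
theorem pv_digit_parse (c : Char) (h : PySem.Chars.isdigit c = true) :
    (PySem.Int.ofStr? (String.ofList [c])).getD 0 = (c.toNat : Int) - 48 := by
  simp only [PySem.Chars.isdigit, Bool.and_eq_true, decide_eq_true_eq] at h
  have h1 : 48 ≤ c.toNat := h.1
  have h2 : c.toNat ≤ 57 := h.2
  have hc : Char.ofNat c.toNat = c := Char.ofNat_toNat c
  rw [← hc]
  interval_cases (c.toNat) <;> decide

-- on digit strings the parse-fold is the ord-arithmetic fold
theorem pv_prefixVal_eq (cs : List Char) (h : ∀ c ∈ cs, PySem.Chars.isdigit c = true) :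
    pvPrefixVal cs = cs.foldl (fun a c => 10 * a + ((c.toNat : Int) - 48)) 0 := by
  rw [pvPrefixVal]
  apply PySem.List.foldl_congr_mem
  intro a c hc
  rw [pv_digit_parse c (h c hc)]

-- pvPopLoop peels its accumulator off
theorem pvPopLoop_acc (n : Nat) : ∀ c, pvPopLoop n c = c + pvPopLoop n 0 := by
  induction n using Nat.strong_induction_on with
  | _ n ih =>
    intro c
    by_cases h0 : n = 0
    · simp [pvPopLoop, h0]
    · rw [show pvPopLoop n c = pvPopLoop (n / 2) (c + n % 2) from by
          rw [pvPopLoop, if_neg h0],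
        show pvPopLoop n 0 = pvPopLoop (n / 2) (0 + n % 2) from by
          rw [pvPopLoop, if_neg h0],
        ih (n / 2) (Nat.div_lt_self (Nat.pos_of_ne_zero h0) one_lt_two) (c + n % 2),
        ih (n / 2) (Nat.div_lt_self (Nat.pos_of_ne_zero h0) one_lt_two) (0 + n % 2)]
      omega

-- counting a single character with Chars.count.go is List.count
theorem pv_count_go_single (c : Char) :
    ∀ (fuel : Nat) (l : List Char) (acc : Nat), l.length ≤ fuel →
      PySem.Chars.count.go [c] fuel l acc = acc + l.count c := by
  intro fuel
  induction fuel with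
  | zero =>
    intro l acc hl
    have : l = [] := List.eq_nil_of_length_eq_zero (Nat.le_zero.mp hl)
    subst this
    exact (show PySem.Chars.count.go [c] 0 [] acc = acc from rfl).trans (by simp)
  | succ f ih =>
    intro l acc hl
    cases l with
    | nil => simp [PySem.Chars.count.go]
    | cons a t =>
      rw [PySem.Chars.count.go]
      by_cases hac : a = c
      · have hp : List.isPrefixOf [c] (a :: t) = true := by
          simp [List.isPrefixOf, hac]
        rw [if_pos hp]
        simp only [List.length_cons] at hl
        simp only [List.length_singleton, List.drop_one, List.tail_cons]
        rw [ih t (acc + 1) (Nat.le_of_succ_le_succ hl)]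
        simp [hac]
        omega
      · have hp : List.isPrefixOf [c] (a :: t) = false := by
          simp [List.isPrefixOf]
          exact fun hca => absurd hca.symm hac
        rw [if_neg (by simp [hp])]
        simp only [List.length_cons] at hl
        rw [ih t acc (Nat.le_of_succ_le_succ hl)]
        simp [hac]

theorem pv_count_single (l : List Char) (c : Char) :
    PySem.Chars.count l [c] = l.count c := by
  rw [PySem.Chars.count]
  simp only [List.isEmpty_cons]
  exact (pv_count_go_single c l.length l 0 le_rfl).trans (Nat.zero_add _)

-- counting '1' in the binary digits of m is the popcount loop
theorem pv_toDigits_count (m : Nat) :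
    ∀ (fuel : Nat) (ds : List Char), m < fuel →
      (Nat.toDigitsCore 2 fuel m ds).count '1' = pvPopLoop m 0 + ds.count '1' := by
  induction m using Nat.strong_induction_on with
  | _ m ih =>
    intro fuel ds hm
    cases fuel with
    | zero => omega
    | succ f =>
      rw [Nat.toDigitsCore]
      by_cases h2 : m / 2 = 0
      · rw [if_pos h2]
        have hm2 : m = 0 ∨ m = 1 := by omega
        rcases hm2 with h | h <;> (simp [h, pvPopLoop, Nat.digitChar]; try omega)
      · rw [if_neg h2]
        have hdiv : m / 2 < m := Nat.div_lt_self (by omega) one_lt_two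
        have hfuel : m / 2 < f := by omega
        rw [ih (m / 2) hdiv f _ hfuel]
        have hone : pvPopLoop m 0 = m % 2 + pvPopLoop (m / 2) 0 := by
          rw [pvPopLoop, if_neg (by omega), pvPopLoop_acc, Nat.zero_add]
        rw [hone]
        have hm2 : m % 2 = 0 ∨ m % 2 = 1 := by omega
        rcases hm2 with h | h <;> (simp [h, Nat.digitChar]; try omega)

-- ones = bin(v).count('1') = popcount loop, for v ≥ 0
theorem pv_ones_eq (v : Int) (hv : 0 ≤ v) :
    (PySem.Str.count (PySem.Int.pyBin v) "1" : Nat) = pvPopLoop v.toNat 0 := by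
  rw [PySem.Str.count]
  rw [show (PySem.Int.pyBin v).toList = PySem.Int.toBinChars0b v from PySem.Int.toList_pyBin v]
  rw [PySem.Int.toBinChars0b, if_neg (by omega)]
  rw [show ("1" : String).toList = ['1'] from rfl, pv_count_single]
  rw [show List.count '1' ('0' :: 'b' :: Nat.toDigits 2 v.toNat) = List.count '1' (Nat.toDigits 2 v.toNat) from by
    simp]
  rw [Nat.toDigits, pv_toDigits_count v.toNat (v.toNat + 1) [] (Nat.lt_succ_self _)]
  simp

-- prefix values of a digit string are nonnegative
theorem pv_prefixVal_nonneg (cs : List Char) (h : ∀ c ∈ cs, PySem.Chars.isdigit c = true) :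
    0 ≤ pvPrefixVal cs := by
  rw [pv_prefixVal_eq cs h]
  induction cs using List.reverseRecOn with
  | nil => simp
  | append_singleton t c iht =>
    rw [List.foldl_append]
    have hc := h c (by simp)
    simp only [PySem.Chars.isdigit, Bool.and_eq_true, decide_eq_true_eq] at hc
    have h48 : 48 ≤ c.toNat := hc.1
    have ht : 0 ≤ t.foldl (fun a c => 10 * a + ((c.toNat : Int) - 48)) 0 :=
      iht (fun c hcm => h c (by simp [hcm]))
    simp only [List.foldl_cons, List.foldl_nil]
    have : (48 : Int) ≤ (c.toNat : Int) := by exact_mod_cast h48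
    omega

-- the golden value of one prefix
def pvG (cs : List Char) : Int := (pvPopLoop (pvPrefixVal cs).toNat 0 : Nat)

-- the B-side fold written over List.range
def pvBfold (ds : List Char) : Int :=
  (List.range ds.length).foldl (fun b k => max b (pvG (ds.take (k + 1)))) 0

-- the main invariant: A's fold is (prefix value, running max of prefix popcounts)
theorem pv_main (ds : List Char) (h : ∀ c ∈ ds, PySem.Chars.isdigit c = true) :
    ds.foldl
      (fun (p : Int × Int) ch =>
        let digit := (PySem.Int.ofStr? (String.ofList [ch])).getD 0
        let v := p.1 * 10 + digit
        let binary := PySem.Int.pyBin v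
        let ones : Int := (PySem.Str.count binary "1" : Nat)
        (v, max p.2 ones))
      (0, 0) = (pvPrefixVal ds, pvBfold ds) := by
  induction ds using List.reverseRecOn with
  | nil => simp [pvPrefixVal, pvBfold]
  | append_singleton t c iht =>
    have ht : ∀ c ∈ t, PySem.Chars.isdigit c = true := fun c hc => h c (by simp [hc])
    have hc : PySem.Chars.isdigit c = true := h c (by simp)
    rw [List.foldl_append, iht ht]
    simp only [List.foldl_cons, List.foldl_nil]
    rw [pv_digit_parse c hc]
    rw [Prod.mk.injEq]
    have hval : pvPrefixVal (t ++ [c]) = pvPrefixVal t * 10 + ((c.toNat : Int) - 48) := by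
      rw [pvPrefixVal, pvPrefixVal, List.foldl_append]
      simp only [List.foldl_cons, List.foldl_nil]
      rw [pv_digit_parse c hc]
      ring_nf
    have hnn : 0 ≤ pvPrefixVal (t ++ [c]) := pv_prefixVal_nonneg _ h
    constructor
    · rw [hval]
    · -- the new max: pvBfold (t ++ [c]) = max (pvBfold t) (pvG (t ++ [c]))
      rw [pv_ones_eq _ (hval ▸ hnn)]
      have hB : pvBfold (t ++ [c]) = max (pvBfold t) (pvG (t ++ [c])) := by
        rw [pvBfold, pvBfold]
        simp only [List.length_append, List.length_singleton]
        rw [List.range_succ, List.foldl_append]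
        simp only [List.foldl_cons, List.foldl_nil]
        congr 1
        · apply PySem.List.foldl_congr_mem
          intro b k hk
          rw [List.mem_range] at hk
          rw [List.take_append_of_le_length (by omega)]
        · rw [List.take_of_length_le (by simp)]
      rw [hB, pvG, hval]

-- B's port unfolded to pvBfold
theorem pv_alt_eq (x : String) : solve_alt x = pvBfold x.toList := by
  rw [solve_alt, pvBfold]
  rw [PySem.Str.len_eq, PySem.List.pyRange_one]
  rw [show ((x.toList.length : Int) + 1 - 1) = ((x.toList.length : Nat) : Int) by ring,
    Int.toNat_natCast]
  rw [List.foldl_map]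
  apply PySem.List.foldl_congr_mem
  intro b k hk
  rw [List.mem_range] at hk
  simp only [pvG]
  rw [show (1 : Int) + (k : Int) = ((k + 1 : Nat) : Int) by push_cast; ring,
    PySem.List.slice_to_natCast]

-- ===== VERDICT (by name: the statement is the Claim_ definition above) =====
theorem solve_spec : Claim_equal_solve := by
  intro x _hdom hpre
  unfold Spec_solve solve
  simp only
  rw [Pre_solve] at hpre
  rw [List.all_eq_true] at hpre
  rw [pv_main x.toList hpre, pv_alt_eq]
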